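-- pv_equiv track=rewrite | github.com/dougwmorrow/scd2 | orchestration/guards.py | _median_from_rows
-- ===== SOURCE A (Python) =====
-- def _median_from_rows(rows: list) -> int | None:
--     """Compute median row count from query result rows."""
--     if not rows:
--         return None
--
--     counts = sorted(r[0] for r in rows if r[0] is not None)
--     if not counts:
--         return None
--
--     mid = len(counts) // 2
--     if len(counts) % 2 == 0:
--         return (counts[mid - 1] + counts[mid]) // 2
--     return counts[mid]
-- ===== SOURCE B (Python) =====
-- def _select(xs, k):
--     """k-th smallest (0-based) of non-empty list xs by three-way quickselect."""
--     while True: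
--         p = xs[0]
--         lt = [x for x in xs if x < p]
--         if k < len(lt):
--             xs = lt
--             continue
--         n_eq = len([x for x in xs if x == p])
--         if k < len(lt) + n_eq:
--             return p
--         k -= len(lt) + n_eq
--         xs = [x for x in xs if x > p]
--
--
-- def _median_from_rows(rows: list) -> int | None:
--     """Compute median row count from query result rows."""
--     if not rows:
--         return None
--     counts = [r[0] for r in rows if r[0] is not None]
--     if not counts:
--         return None
--     mid = len(counts) // 2
--     if len(counts) % 2 == 1:
--         return _select(counts, mid)
--     return (_select(counts, mid - 1) + _select(counts, mid)) // 2
-- ===== Notes on version B (the rewrite author's own statement) =====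
-- stated objective: alternative
-- what changed: Replace the full sort of the non-null first-column values by a three-way quickselect for the middle order statistic(s); it trades the O(n log n) sort for average-linear selection passes, though CPython's C-coded sort keeps wall-clock times comparable.
import Mathlib
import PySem

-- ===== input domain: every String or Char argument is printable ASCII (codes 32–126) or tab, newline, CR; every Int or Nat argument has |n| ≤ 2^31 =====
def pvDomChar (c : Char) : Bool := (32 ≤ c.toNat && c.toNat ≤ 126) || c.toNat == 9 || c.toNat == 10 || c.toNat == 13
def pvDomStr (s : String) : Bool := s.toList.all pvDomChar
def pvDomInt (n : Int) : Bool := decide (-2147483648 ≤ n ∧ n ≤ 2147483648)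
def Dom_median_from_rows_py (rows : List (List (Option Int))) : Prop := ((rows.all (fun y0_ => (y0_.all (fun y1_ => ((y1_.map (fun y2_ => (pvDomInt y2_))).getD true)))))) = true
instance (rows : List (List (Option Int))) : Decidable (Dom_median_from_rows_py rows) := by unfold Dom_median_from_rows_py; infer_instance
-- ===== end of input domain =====

-- B replaces A's full sort by a three-way quickselect for the middle order statistic(s) (objective: alternative algorithm, same measured cost).

-- ===== PORT A =====
-- r[0] is PySem.List.pyGetD r 0 none; the IndexError on an empty row is excluded by Pre_.
def median_from_rows_py (rows : List (List (Option Int))) : Option Int :=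
  if rows = [] then none
  else
    let counts := PySem.List.sorted (rows.filterMap (fun r => PySem.List.pyGetD r 0 none)) (fun x => x) false
    if counts = [] then none
    else
      let mid := PySem.Int.floordiv (PySem.List.len counts) 2
      if PySem.Int.mod (PySem.List.len counts) 2 = 0 then
        some (PySem.Int.floordiv
          (PySem.List.pyGetD counts (mid - 1) 0 + PySem.List.pyGetD counts mid 0) 2)
      else some (PySem.List.pyGetD counts mid 0)

-- ===== PORT B =====
-- _select: k-th smallest (0-based) by three-way quickselect, pivot = first element.
def qselect : List Int → Nat → Int
  | [], _ => 0  -- unreachable under k < xs.length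
  | p :: rest, k =>
    let lt := (p :: rest).filter (fun x => decide (x < p))
    if k < lt.length then qselect lt k
    else
      let ne := ((p :: rest).filter (fun x => decide (x = p))).length
      if k < lt.length + ne then p
      else qselect ((p :: rest).filter (fun x => decide (p < x))) (k - (lt.length + ne))
termination_by xs _ => xs.length
decreasing_by
  · simp only [List.filter_cons, decide_eq_true_eq, lt_self_iff_false, if_false,
      List.length_cons]
    exact Nat.lt_succ_of_le (List.length_filter_le _ _)
  · simp only [List.filter_cons, decide_eq_true_eq, lt_self_iff_false, if_false,
      List.length_cons]
    exact Nat.lt_succ_of_le (List.length_filter_le _ _)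

def median_from_rows_py_alt (rows : List (List (Option Int))) : Option Int :=
  if rows = [] then none
  else
    let counts := rows.filterMap (fun r => PySem.List.pyGetD r 0 none)
    if counts = [] then none
    else
      let mid := counts.length / 2
      if counts.length % 2 = 1 then some (qselect counts mid)
      else some (PySem.Int.floordiv (qselect counts (mid - 1) + qselect counts mid) 2)

-- ===== PRECONDITION & SPEC =====
-- Pre_ excludes rows containing an empty inner list: there Python A raises IndexError on r[0].
def Pre_median_from_rows_py (rows : List (List (Option Int))) : Prop :=
  ∀ r ∈ rows, r ≠ []
instance (rows : List (List (Option Int))) : Decidable (Pre_median_from_rows_py rows) := by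
  unfold Pre_median_from_rows_py; infer_instance

def pvWitness_median_from_rows_py : List (List (Option Int)) := [[some 1], [none], [some 3]]

def Spec_median_from_rows_py (rows : List (List (Option Int))) (out : Option Int) : Prop := out = median_from_rows_py_alt rows
instance (rows : List (List (Option Int))) (out : Option Int) : Decidable (Spec_median_from_rows_py rows out) := by unfold Spec_median_from_rows_py; infer_instance

-- ===== CLAIM (what is proved, stated in full; the proofs are below) =====
def Claim_equal_median_from_rows_py : Prop := ∀ (rows : List (List (Option Int))), Dom_median_from_rows_py rows → Pre_median_from_rows_py rows → Spec_median_from_rows_py rows (median_from_rows_py rows)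

-- ===== LEMMAS AND PROOFS =====

-- three-way partition by the pivot is a permutation of the list
lemma threeway_perm (xs : List Int) (p : Int) :
    (xs.filter (fun x => decide (x < p)) ++ xs.filter (fun x => decide (x = p)) ++
      xs.filter (fun x => decide (p < x))).Perm xs := by
  induction xs with
  | nil => simp
  | cons a t ih =>
    rcases lt_trichotomy a p with h | h | h
    · simpa [List.filter_cons, h, h.ne, not_lt_of_gt h] using ih.cons a
    · subst h
      simp only [List.filter_cons, decide_eq_true_eq, lt_self_iff_false, if_false, if_true,
        decide_true, List.append_assoc, List.cons_append]
      exact List.perm_middle.trans ((by simpa [List.append_assoc] using ih : (List.filter (fun x => decide (x < a)) t ++ (List.filter (fun x => decide (x = a)) t ++ List.filter (fun x => decide (a < x)) t)).Perm t).cons a)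
    · simpa [List.filter_cons, h, h.ne', not_lt_of_gt h] using
        ((List.perm_middle).trans (ih.cons a))


-- sorted(xs) splits as sorted(<p) ++ (=p) ++ sorted(>p)
lemma sorted_threeway (xs : List Int) (p : Int) :
    PySem.List.sorted xs (fun x => x) false =
      PySem.List.sorted (xs.filter (fun x => decide (x < p))) (fun x => x) false
      ++ xs.filter (fun x => decide (x = p))
      ++ PySem.List.sorted (xs.filter (fun x => decide (p < x))) (fun x => x) false := by
  have hlt := PySem.List.sorted_perm (xs.filter (fun x => decide (x < p))) (fun x => x) false
  have hgt := PySem.List.sorted_perm (xs.filter (fun x => decide (p < x))) (fun x => x) false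
  apply PySem.List.sorted_id_eq_of_perm_of_pairwise
  · exact ((hlt.append (List.Perm.refl _)).append hgt).trans (threeway_perm xs p)
  · have hmlt : ∀ x ∈ PySem.List.sorted (xs.filter (fun x => decide (x < p))) (fun x => x) false, x < p := by
      intro x hx
      rw [PySem.List.mem_sorted] at hx
      exact of_decide_eq_true (List.mem_filter.mp hx).2
    have hmgt : ∀ x ∈ PySem.List.sorted (xs.filter (fun x => decide (p < x))) (fun x => x) false, p < x := by
      intro x hx
      rw [PySem.List.mem_sorted] at hx
      exact of_decide_eq_true (List.mem_filter.mp hx).2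
    have hmeq : ∀ x ∈ xs.filter (fun x => decide (x = p)), x = p := by
      intro x hx
      exact of_decide_eq_true (List.mem_filter.mp hx).2
    rw [List.pairwise_append, List.pairwise_append]
    refine ⟨⟨by simpa using PySem.List.sorted_pairwise (xs.filter (fun x => decide (x < p))) (fun x => x), ?_, ?_⟩, ?_, ?_⟩
    · exact List.pairwise_iff_forall_sublist.mpr (fun {a b} hs => by
        have ha := hmeq a (hs.subset (by simp))
        have hb := hmeq b (hs.subset (by simp))
        omega)
    · intro a ha b hb
      have := hmlt a ha; have := hmeq b hb; omega
    · simpa using PySem.List.sorted_pairwise (xs.filter (fun x => decide (p < x))) (fun x => x)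
    · intro a ha b hb
      have hb' := hmgt b hb
      rcases List.mem_append.mp ha with h | h
      · have := hmlt a h; omega
      · have := hmeq a h; omega

lemma qselect_eq_sorted_aux (n : Nat) : ∀ (xs : List Int) (k : Nat), xs.length ≤ n → k < xs.length →
    qselect xs k = (PySem.List.sorted xs (fun x => x) false).getD k 0 := by
  induction n with
  | zero => intro xs k h hk; omega
  | succ n ih =>
    intro xs k hlen hk
    match xs with
    | [] => simp at hk
    | p :: rest =>
      have hS := sorted_threeway (p :: rest) p
      have hperm := threeway_perm (p :: rest) p
      have htot := hperm.length_eq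
      rw [List.length_append, List.length_append] at htot
      have hAlen : (PySem.List.sorted ((p :: rest).filter (fun x => decide (x < p))) (fun x => x) false).length
          = ((p :: rest).filter (fun x => decide (x < p))).length := PySem.List.length_sorted _ _ _
      have hClen : (PySem.List.sorted ((p :: rest).filter (fun x => decide (p < x))) (fun x => x) false).length
          = ((p :: rest).filter (fun x => decide (p < x))).length := PySem.List.length_sorted _ _ _
      have hcons : (p :: rest).length = rest.length + 1 := by simp
      have hlt_len : ((p :: rest).filter (fun x => decide (x < p))).length ≤ rest.length := by
        simp only [List.filter_cons, decide_eq_true_eq, lt_self_iff_false, if_false]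
        exact List.length_filter_le _ _
      have hgt_len : ((p :: rest).filter (fun x => decide (p < x))).length ≤ rest.length := by
        simp only [List.filter_cons, decide_eq_true_eq, lt_self_iff_false, if_false]
        exact List.length_filter_le _ _
      rw [qselect]
      simp only []
      by_cases h1 : k < ((p :: rest).filter (fun x => decide (x < p))).length
      · rw [if_pos h1, ih _ _ (by omega) h1, hS,
          List.getD_eq_getElem (PySem.List.sorted ((p :: rest).filter (fun x => decide (x < p))) (fun x => x) false) 0 (by omega),
          List.getD_eq_getElem _ 0 (by simp only [List.length_append, hAlen, hClen]; omega)]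
        rw [List.getElem_append_left (by simp only [List.length_append, hAlen]; omega),
          List.getElem_append_left (by omega)]
      · rw [if_neg h1]
        by_cases h2 : k < ((p :: rest).filter (fun x => decide (x < p))).length +
            ((p :: rest).filter (fun x => decide (x = p))).length
        · rw [if_pos h2, hS, List.getD_eq_getElem _ 0 (by simp only [List.length_append, hAlen, hClen]; omega)]
          rw [List.getElem_append_left (by simp only [List.length_append, hAlen]; omega),
            List.getElem_append_right (by omega)]
          have hmem : ((p :: rest).filter (fun x => decide (x = p)))[k - (PySem.List.sorted ((p :: rest).filter (fun x => decide (x < p))) (fun x => x) false).length]'(by omega) ∈ (p :: rest).filter (fun x => decide (x = p)) :=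
            List.getElem_mem _
          exact (of_decide_eq_true (List.mem_filter.mp hmem).2).symm
        · rw [if_neg h2]
          have hk' : k - (((p :: rest).filter (fun x => decide (x < p))).length +
              ((p :: rest).filter (fun x => decide (x = p))).length) <
              ((p :: rest).filter (fun x => decide (p < x))).length := by omega
          rw [ih _ _ (by omega) hk', hS,
            List.getD_eq_getElem (PySem.List.sorted ((p :: rest).filter (fun x => decide (p < x))) (fun x => x) false) 0 (by omega),
            List.getD_eq_getElem _ 0 (by simp only [List.length_append, hAlen, hClen]; omega)]
          rw [List.getElem_append_right (by simp only [List.length_append, hAlen]; omega)]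
          congr 1
          simp only [List.length_append, hAlen]

lemma qselect_eq_sorted (xs : List Int) (k : Nat) (hk : k < xs.length) :
    qselect xs k = (PySem.List.sorted xs (fun x => x) false).getD k 0 :=
  qselect_eq_sorted_aux xs.length xs k le_rfl hk

-- ===== VERDICT (by name: the statement is the Claim_ definition above) =====
theorem median_from_rows_py_spec : Claim_equal_median_from_rows_py := by
  intro rows _ _
  unfold Spec_median_from_rows_py median_from_rows_py median_from_rows_py_alt
  by_cases hr : rows = []
  · simp [hr]
  · simp only [if_neg hr]
    set cnt := rows.filterMap (fun r => PySem.List.pyGetD r 0 none) with hcnt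
    set S := PySem.List.sorted cnt (fun x => x) false with hSdef
    by_cases hc : cnt = []
    · simp [hSdef, hc, PySem.List.sorted_eq_nil_iff]
    · have hs : S ≠ [] := by rw [hSdef, Ne, PySem.List.sorted_eq_nil_iff]; exact hc
      rw [if_neg hs, if_neg hc]
      have hlen : S.length = cnt.length := PySem.List.length_sorted _ _ _
      have hn0 : cnt.length ≠ 0 := by simpa [List.length_eq_zero_iff] using hc
      have hfd : PySem.Int.floordiv ((cnt.length : Nat) : Int) 2 = ((cnt.length / 2 : Nat) : Int) := by
        exact_mod_cast PySem.Int.floordiv_natCast cnt.length 2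
      have hmd : PySem.Int.mod ((cnt.length : Nat) : Int) 2 = ((cnt.length % 2 : Nat) : Int) := by
        exact_mod_cast PySem.Int.mod_natCast cnt.length 2
      have hq1 : qselect cnt (cnt.length / 2) = S.getD (cnt.length / 2) 0 :=
        qselect_eq_sorted _ _ (by omega)
      simp only [PySem.List.len_eq, hlen, hfd, hmd]
      rcases Nat.mod_two_eq_zero_or_one cnt.length with h2 | h2
      · -- even length
        have hq2 : qselect cnt (cnt.length / 2 - 1) = S.getD (cnt.length / 2 - 1) 0 :=
          qselect_eq_sorted _ _ (by omega)
        have hmid1 : ((cnt.length / 2 : Nat) : Int) - 1 = ((cnt.length / 2 - 1 : Nat) : Int) := by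
          omega
        rw [if_pos (by rw [h2]; rfl), if_neg (by omega)]
        rw [hmid1, PySem.List.pyGetD_natCast, PySem.List.pyGetD_natCast, hq1, hq2]
      · -- odd length
        rw [if_neg (by rw [h2]; exact one_ne_zero), if_pos h2]
        rw [PySem.List.pyGetD_natCast, hq1]
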